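-- pv_equiv track=rewrite | github.com/cjon256/dsa | python/1662.check-if-two-string-arrays-are-equivalent.py | arrayStringsAreEqual
-- ===== SOURCE A (Python) =====
-- from itertools import chain, zip_longest
-- from typing import List
--
-- def arrayStringsAreEqual(word1: List[str], word2: List[str]) -> bool:
--     if word1 is word2:
--         return True
--     for l1, l2 in zip_longest(
--         chain.from_iterable(word1), chain.from_iterable(word2)
--     ):
--         if l1 != l2:
--             return False
--     return True
-- ===== SOURCE B (Python) =====
-- def arrayStringsAreEqual(word1, word2):
--     return "".join(word1) == "".join(word2)
-- ===== Notes on version B (the rewrite author's own statement) =====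
-- stated objective: simpler
-- what changed: B materializes both concatenations with ''.join and compares them in one equality test, replacing A's identity fast-path plus streaming zip_longest character loop.
import Mathlib
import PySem

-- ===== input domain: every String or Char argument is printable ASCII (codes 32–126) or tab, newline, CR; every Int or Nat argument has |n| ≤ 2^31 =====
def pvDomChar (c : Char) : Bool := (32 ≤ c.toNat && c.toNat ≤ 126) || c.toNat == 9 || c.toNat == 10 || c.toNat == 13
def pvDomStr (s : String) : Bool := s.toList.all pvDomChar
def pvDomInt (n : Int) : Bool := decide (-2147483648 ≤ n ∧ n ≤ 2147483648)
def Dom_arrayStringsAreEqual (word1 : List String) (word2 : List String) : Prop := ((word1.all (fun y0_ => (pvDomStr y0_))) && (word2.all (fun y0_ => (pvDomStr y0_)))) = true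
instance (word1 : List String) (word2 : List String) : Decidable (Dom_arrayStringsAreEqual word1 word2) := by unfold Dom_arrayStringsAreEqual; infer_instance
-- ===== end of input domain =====

-- B replaces A's streaming zip_longest character loop by building both full
-- concatenations and comparing them with one equality test (simpler decomposition).
-- 'word1 is word2' (object identity) is ported as list equality: identity implies
-- equality, and on equal lists the loop returns True as well.

-- ===== PORT A =====
-- the for-loop over zip_longest(chain(word1), chain(word2)): walk both char streams,
-- return False at the first position where they differ (missing side = fill value)
def pvZipLoop : List Char → List Char → Bool
  | [], [] => true
  | _ :: _, [] => false
  | [], _ :: _ => false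
  | a :: as, b :: bs => if a ≠ b then false else pvZipLoop as bs

def arrayStringsAreEqual (word1 : List String) (word2 : List String) : Bool :=
  if word1 = word2 then true
  else pvZipLoop (word1.map String.toList).flatten (word2.map String.toList).flatten

-- ===== PORT B =====
def arrayStringsAreEqual_alt (word1 : List String) (word2 : List String) : Bool :=
  PySem.Str.join "" word1 == PySem.Str.join "" word2

-- ===== PRECONDITION & SPEC =====
def Spec_arrayStringsAreEqual (word1 : List String) (word2 : List String) (out : Bool) : Prop := out = arrayStringsAreEqual_alt word1 word2
instance (word1 : List String) (word2 : List String) (out : Bool) : Decidable (Spec_arrayStringsAreEqual word1 word2 out) := by unfold Spec_arrayStringsAreEqual; infer_instance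

-- ===== CLAIM (what is proved, stated in full; the proofs are below) =====
def Claim_equal_arrayStringsAreEqual : Prop := ∀ (word1 : List String) (word2 : List String), Dom_arrayStringsAreEqual word1 word2 → Spec_arrayStringsAreEqual word1 word2 (arrayStringsAreEqual word1 word2)

-- ===== LEMMAS AND PROOFS =====
theorem pvZipLoop_eq_beq (xs ys : List Char) : pvZipLoop xs ys = (xs == ys) := by
  induction xs generalizing ys with
  | nil => cases ys <;> simp [pvZipLoop]
  | cons a as ih =>
    cases ys with
    | nil => simp [pvZipLoop]
    | cons b bs => by_cases h : a = b <;> simp [pvZipLoop, h, ih]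

theorem chars_join_nil_eq_flatten (ls : List (List Char)) :
    PySem.Chars.join [] ls = ls.flatten := by
  induction ls with
  | nil => rfl
  | cons x xs ih =>
    cases xs with
    | nil => simp [PySem.Chars.join_singleton]
    | cons y ys => simp [PySem.Chars.join_cons_cons, ih]

theorem str_beq_toList (s t : String) : (s == t) = (s.toList == t.toList) := by
  by_cases h : s = t
  · simp [h]
  · have h' : s.toList ≠ t.toList := fun he => h (String.toList_inj.mp he)
    simp [h, h']

-- ===== VERDICT (by name: the statement is the Claim_ definition above) =====
theorem arrayStringsAreEqual_spec : Claim_equal_arrayStringsAreEqual := by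
  intro word1 word2 _
  unfold Spec_arrayStringsAreEqual arrayStringsAreEqual arrayStringsAreEqual_alt
  rw [str_beq_toList]
  rw [PySem.Str.toList_join, PySem.Str.toList_join,
    (show "".toList = ([] : List Char) from rfl),
    chars_join_nil_eq_flatten, chars_join_nil_eq_flatten]
  split_ifs with h
  · subst h; simp
  · rw [pvZipLoop_eq_beq]
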